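-- pv_equiv track=rewrite | github.com/Mantri-AI/textlite | textlite/keyphrases.py | _candidate_ngrams
-- ===== SOURCE A (Python) =====
-- from typing import Iterable, List, Sequence
--
-- _STOPWORDS = {
--     "a", "an", "and", "are", "as", "at", "be", "by", "for", "from", "has",
--     "have", "in", "is", "it", "its", "of", "on", "or", "that", "the", "their",
--     "this", "to", "was", "were", "will", "with", "into", "about", "across", "over",
--     "under", "between", "while", "than", "then", "also", "can", "could", "should",
-- }
--
-- def _valid_token(token: str) -> bool:
--     if len(token) < 3:
--         return False
--     if token in _STOPWORDS:
--         return False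
--     return True
--
-- def _candidate_ngrams(tokens: Sequence[str], min_ngram: int, max_ngram: int) -> Iterable[str]:
--     size = len(tokens)
--     for n in range(min_ngram, max_ngram + 1):
--         if n <= 0 or n > size:
--             continue
--         for idx in range(0, size - n + 1):
--             phrase_tokens = tokens[idx: idx + n]
--             if not all(_valid_token(t) for t in phrase_tokens):
--                 continue
--             phrase = " ".join(phrase_tokens)
--             yield phrase
-- ===== SOURCE B (Python) =====
-- from typing import Iterable, List, Sequence
--
-- _STOPWORDS = {
--     "a", "an", "and", "are", "as", "at", "be", "by", "for", "from", "has",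
--     "have", "in", "is", "it", "its", "of", "on", "or", "that", "the", "their",
--     "this", "to", "was", "were", "will", "with", "into", "about", "across", "over",
--     "under", "between", "while", "than", "then", "also", "can", "could", "should",
-- }
--
-- def _candidate_ngrams(tokens: Sequence[str], min_ngram: int, max_ngram: int) -> Iterable[str]:
--     # Prefix sums of invalid-token counts: bad[i] = number of invalid tokens among tokens[:i],
--     # so a window tokens[idx:idx+n] is all-valid iff bad[idx+n] == bad[idx] (an O(1) test).
--     size = len(tokens)
--     bad = [0]
--     c = 0
--     for t in tokens:
--         if not (len(t) >= 3 and t not in _STOPWORDS):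
--             c += 1
--         bad.append(c)
--     for n in range(min_ngram, max_ngram + 1):
--         if n <= 0 or n > size:
--             continue
--         for idx in range(size - n + 1):
--             if bad[idx + n] == bad[idx]:
--                 yield " ".join(tokens[idx:idx + n])
-- ===== Notes on version B (the rewrite author's own statement) =====
-- stated objective: alternative
-- what changed: Replaces the per-window all(_valid_token(t)) scan with a once-computed prefix-sum array of invalid-token counts, so each window's validity test is a single O(1) comparison instead of a token scan.
import Mathlib
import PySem

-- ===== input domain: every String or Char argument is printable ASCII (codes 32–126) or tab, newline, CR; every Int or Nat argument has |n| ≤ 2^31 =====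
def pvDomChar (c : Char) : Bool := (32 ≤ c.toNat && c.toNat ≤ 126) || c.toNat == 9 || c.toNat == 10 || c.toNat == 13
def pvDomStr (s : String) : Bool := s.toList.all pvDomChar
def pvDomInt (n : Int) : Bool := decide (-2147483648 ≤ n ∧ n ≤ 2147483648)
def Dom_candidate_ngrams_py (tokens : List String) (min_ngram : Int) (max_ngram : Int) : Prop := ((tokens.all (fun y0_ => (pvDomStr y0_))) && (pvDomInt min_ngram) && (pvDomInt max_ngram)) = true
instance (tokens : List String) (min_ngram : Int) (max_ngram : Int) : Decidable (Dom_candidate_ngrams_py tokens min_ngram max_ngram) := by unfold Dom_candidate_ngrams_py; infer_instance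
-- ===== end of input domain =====

-- B replaces A's per-window all(_valid_token) scan with a precomputed prefix-sum array of
-- invalid-token counts: each window's validity test becomes a single comparison (objective: alternative).


-- ===== PORT A =====
def pvStopwords : List String :=
  ["a", "an", "and", "are", "as", "at", "be", "by", "for", "from", "has",
   "have", "in", "is", "it", "its", "of", "on", "or", "that", "the", "their",
   "this", "to", "was", "were", "will", "with", "into", "about", "across", "over",
   "under", "between", "while", "than", "then", "also", "can", "could", "should"]

def validToken (t : String) : Bool :=
  if PySem.Str.len t < 3 then false
  else if pvStopwords.contains t then false
  else true

def candidate_ngrams_py (tokens : List String) (min_ngram : Int) (max_ngram : Int) : List String :=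
  let size : Int := PySem.List.len tokens
  (PySem.List.pyRange min_ngram (max_ngram + 1) 1).foldl (fun acc n =>
    if n ≤ 0 ∨ n > size then acc
    else (PySem.List.pyRange 0 (size - n + 1) 1).foldl (fun acc2 idx =>
      let phrase_tokens := PySem.List.slice tokens (some idx) (some (idx + n))
      if phrase_tokens.all validToken then acc2 ++ [PySem.Str.join " " phrase_tokens]
      else acc2) acc) []

-- ===== PORT B =====
def validTokenB (t : String) : Bool := 3 ≤ PySem.Str.len t && !pvStopwords.contains t

-- the loop building bad: bad starts [0], c starts 0; each token appends the running invalid count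
def badStep (st : List Int × Int) (t : String) : List Int × Int :=
  let c := if !validTokenB t then st.2 + 1 else st.2
  (st.1 ++ [c], c)

def candidate_ngrams_py_alt (tokens : List String) (min_ngram : Int) (max_ngram : Int) : List String :=
  let size : Int := PySem.List.len tokens
  let bad : List Int := (tokens.foldl badStep ([0], 0)).1
  (PySem.List.pyRange min_ngram (max_ngram + 1) 1).foldl (fun acc n =>
    if n ≤ 0 ∨ n > size then acc
    else (PySem.List.pyRange 0 (size - n + 1) 1).foldl (fun acc2 idx =>
      if PySem.List.pyGetD bad (idx + n) 0 = PySem.List.pyGetD bad idx 0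
      then acc2 ++ [PySem.Str.join " " (PySem.List.slice tokens (some idx) (some (idx + n)))]
      else acc2) acc) []

-- ===== PRECONDITION & SPEC =====
def Spec_candidate_ngrams_py (tokens : List String) (min_ngram : Int) (max_ngram : Int) (out : List String) : Prop := out = candidate_ngrams_py_alt tokens min_ngram max_ngram
instance (tokens : List String) (min_ngram : Int) (max_ngram : Int) (out : List String) : Decidable (Spec_candidate_ngrams_py tokens min_ngram max_ngram out) := by unfold Spec_candidate_ngrams_py; infer_instance

-- ===== CLAIM (what is proved, stated in full; the proofs are below) =====
def Claim_equal_candidate_ngrams_py : Prop := ∀ (tokens : List String) (min_ngram : Int) (max_ngram : Int), Dom_candidate_ngrams_py tokens min_ngram max_ngram → Spec_candidate_ngrams_py tokens min_ngram max_ngram (candidate_ngrams_py tokens min_ngram max_ngram)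

-- ===== LEMMAS AND PROOFS =====

-- count of invalid tokens in a list
def invCount (l : List String) : Nat := l.countP (fun t => !validToken t)

theorem validTokenB_eq (t : String) : validTokenB t = validToken t := by
  unfold validTokenB validToken
  simp only [PySem.Str.len_eq]
  have hb : t.toList.length = t.length := String.length_toList
  split_ifs with h h2
  · have h3 : ¬ 3 ≤ t.length := by omega
    simp [h3]
  · have h3 : 3 ≤ t.length := by omega
    simp [h3]
    simpa using h2
  · have h3 : 3 ≤ t.length := by omega
    have h4 : ¬ t ∈ pvStopwords := by simpa using h2
    simp [h3, h4]

theorem badStep_eq (acc : List Int) (c : Int) (t : String) :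
    badStep (acc, c) t = (acc ++ [c + (invCount [t] : Int)], c + (invCount [t] : Int)) := by
  by_cases h : validToken t <;>
    simp [badStep, validTokenB_eq, invCount, h]

-- the fold invariant for B's prefix array
theorem badFold (l : List String) (acc : List Int) (c : Int) :
    (l.foldl badStep (acc, c)).1
      = acc ++ (List.range l.length).map (fun i => c + (invCount (l.take (i + 1)) : Int)) := by
  induction l generalizing acc c with
  | nil => simp
  | cons t ts ih =>
    rw [List.foldl_cons, badStep_eq, ih, List.length_cons, List.range_succ_eq_map,
      List.map_cons, List.map_map, List.append_assoc, List.singleton_append]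
    congr 1
    congr 1
    apply List.map_congr_left
    intro a _
    simp only [Function.comp_apply]
    by_cases h : validToken t <;> simp [h, invCount] <;> omega

theorem bad_get (tokens : List String) (k : Nat) (hk : k ≤ tokens.length) :
    PySem.List.pyGetD ((tokens.foldl badStep ([0], 0)).1) (k : Int) 0
      = (invCount (tokens.take k) : Int) := by
  rw [badFold]
  rcases Nat.eq_zero_or_pos k with h0 | hpos
  · subst h0; simp [invCount]
  · obtain ⟨j, rfl⟩ : ∃ j, k = j + 1 := ⟨k - 1, by omega⟩
    have hj : j < tokens.length := by omega
    rw [PySem.List.pyGetD_natCast]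
    have hlen : (j + 1 : Nat) < ([(0:Int)] ++ (List.range tokens.length).map
        (fun i => 0 + (invCount (tokens.take (i + 1)) : Int))).length := by
      simp; omega
    rw [List.getD_eq_getElem _ _ hlen]
    simp

-- the key window lemma: A's all-valid test equals B's prefix-sum test
theorem window_eq (tokens : List String) (idx n : Int) (h0 : 0 ≤ idx) (h1 : 1 ≤ n)
    (h2 : idx + n ≤ tokens.length) :
    ((PySem.List.slice tokens (some idx) (some (idx + n))).all validToken = true)
      ↔ PySem.List.pyGetD ((tokens.foldl badStep ([0], 0)).1) (idx + n) 0
          = PySem.List.pyGetD ((tokens.foldl badStep ([0], 0)).1) idx 0 := by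
  obtain ⟨i, rfl⟩ : ∃ i : Nat, idx = (i : Int) := ⟨idx.toNat, by omega⟩
  obtain ⟨m, hm⟩ : ∃ m : Nat, (i : Int) + n = (m : Int) := ⟨((i : Int) + n).toNat, by omega⟩
  have him : i + 1 ≤ m := by omega
  have hmlen : m ≤ tokens.length := by omega
  rw [hm, bad_get tokens m hmlen, bad_get tokens i (by omega),
    PySem.List.slice_natCast]
  have htake : tokens.take m
      = tokens.take i ++ (tokens.drop i).take (m - i) := by
    rw [← List.take_add]
    congr 1
    omega
  constructor
  · intro hall
    rw [htake]
    have hz : List.countP (fun t => !validToken t) ((tokens.drop i).take (m - i)) = 0 :=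
      List.countP_eq_zero.mpr (fun a ha => by simp [List.all_eq_true.mp hall a ha])
    simp [invCount, List.countP_append, hz]
  · intro heq
    have hz : invCount ((tokens.drop i).take (m - i)) = 0 := by
      rw [htake] at heq
      simp only [invCount, List.countP_append] at heq ⊢
      omega
    simp only [invCount, List.countP_eq_zero] at hz
    rw [List.all_eq_true]
    intro a ha
    have := hz a ha
    simpa using this

-- ===== VERDICT (by name: the statement is the Claim_ definition above) =====
theorem candidate_ngrams_py_spec : Claim_equal_candidate_ngrams_py := by
  intro tokens min_ngram max_ngram _
  unfold Spec_candidate_ngrams_py candidate_ngrams_py candidate_ngrams_py_alt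
  simp only [PySem.List.len_eq]
  apply PySem.List.foldl_congr_mem
  intro acc n hn
  rw [PySem.List.mem_pyRange_one] at hn
  by_cases hskip : n ≤ 0 ∨ n > (tokens.length : Int)
  · rw [if_pos hskip, if_pos hskip]
  · rw [if_neg hskip, if_neg hskip]
    rw [not_or] at hskip
    apply PySem.List.foldl_congr_mem
    intro acc2 idx hidx
    rw [PySem.List.mem_pyRange_one] at hidx
    have hkey := window_eq tokens idx n hidx.1 (by omega) (by omega)
    by_cases hall : (PySem.List.slice tokens (some idx) (some (idx + n))).all validToken = true
    · simp only [hall, if_true, hkey.mp hall, if_true]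
    · have hb : ¬ (PySem.List.pyGetD ((tokens.foldl badStep ([0], 0)).1) (idx + n) 0
          = PySem.List.pyGetD ((tokens.foldl badStep ([0], 0)).1) idx 0) := fun h => hall (hkey.mpr h)
      simp only [if_neg hb]
      simp [hall]
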